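-- pv_equiv track=rewrite | github.com/space-elephant/tinyworld-textmode | play.py | isall
-- ===== SOURCE A (Python) =====
-- def isall(name):
--     if name == 'all0':return True
--     if name[:3] != 'all':return False
--     if len(name) <= 3:return False
--     if name[3] == '0':return False
--     for char in name[3:]:
--         if char not in '0123456789':return False
--     return True
-- ===== SOURCE B (Python) =====
-- import re
--
-- _PAT = re.compile(r'all[1-9][0-9]*')
--
-- def isall(name):
--     return name == 'all0' or _PAT.fullmatch(name) is not None
-- ===== Notes on version B (the rewrite author's own statement) =====
-- stated objective: idiomatic
-- what changed: Replaced A's chain of slice/length/leading-zero guards and explicit character loop with the special case 'all0' plus a single precompiled full-string regex match against all[1-9][0-9]*.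
import Mathlib
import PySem

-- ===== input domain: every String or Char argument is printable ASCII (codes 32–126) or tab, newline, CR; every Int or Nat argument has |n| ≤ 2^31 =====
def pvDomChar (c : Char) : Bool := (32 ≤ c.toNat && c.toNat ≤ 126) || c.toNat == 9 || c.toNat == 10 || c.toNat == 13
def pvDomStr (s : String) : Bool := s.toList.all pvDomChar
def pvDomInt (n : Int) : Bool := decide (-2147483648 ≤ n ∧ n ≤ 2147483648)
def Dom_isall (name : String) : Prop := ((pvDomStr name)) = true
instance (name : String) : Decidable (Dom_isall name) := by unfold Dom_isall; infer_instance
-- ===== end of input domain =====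

-- B replaces A's guard chain and character loop with the 'all0' special case plus a
-- full-string regex match all[1-9][0-9]* (ported by hand as a pattern match); objective: idiomatic.

-- ===== PORT A =====
-- 'for char in name[3:]: if char not in '0123456789': return False / return True'
def isallLoop : List Char → Bool
  | [] => true
  | c :: rest => if ("0123456789".toList.contains c) = false then false else isallLoop rest

def isall (name : String) : Bool :=
  let s := name.toList
  if s = "all0".toList then true
  else if PySem.List.slice s none (some 3) ≠ "all".toList then false
  else if s.length ≤ 3 then false
  else if PySem.List.pyGet? s 3 = some '0' then false
  else isallLoop (PySem.List.slice s (some 3) none)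

-- ===== PORT B =====
-- hand port of re.fullmatch(r'all[1-9][0-9]*', name): exact, the regex has no
-- backtracking content — literal prefix 'all', one char in [1-9], then chars in [0-9]
def isall_alt (name : String) : Bool :=
  name == "all0" ||
  (match name.toList with
   | 'a' :: 'l' :: 'l' :: d :: rest =>
       ('1' ≤ d && d ≤ '9') && rest.all (fun c => '0' ≤ c && c ≤ '9')
   | _ => false)

-- ===== PRECONDITION & SPEC =====
def Spec_isall (name : String) (out : Bool) : Prop := out = isall_alt name
instance (name : String) (out : Bool) : Decidable (Spec_isall name out) := by unfold Spec_isall; infer_instance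

-- ===== CLAIM (what is proved, stated in full; the proofs are below) =====
def Claim_equal_isall : Prop := ∀ (name : String), Dom_isall name → Spec_isall name (isall name)

-- ===== LEMMAS AND PROOFS =====

theorem char_eq_iff (c d : Char) : (c = d) ↔ c.val.toNat = d.val.toNat :=
  ⟨fun h => h ▸ rfl, fun h => Char.ext (UInt32.toNat_inj.mp h)⟩

theorem digit_contains_iff (c : Char) :
    ("0123456789".toList.contains c) = ('0' ≤ c && c ≤ '9') := by
  rw [Bool.eq_iff_iff]
  simp only [show "0123456789".toList = ['0','1','2','3','4','5','6','7','8','9'] from rfl,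
    List.contains, List.elem_eq_mem, List.mem_cons, List.not_mem_nil, or_false,
    decide_eq_true_eq, Bool.and_eq_true, char_eq_iff, Char.le_def, UInt32.le_iff_toNat_le]
  simp only [show ('0':Char).val.toNat = 48 from rfl, show ('1':Char).val.toNat = 49 from rfl,
    show ('2':Char).val.toNat = 50 from rfl, show ('3':Char).val.toNat = 51 from rfl,
    show ('4':Char).val.toNat = 52 from rfl, show ('5':Char).val.toNat = 53 from rfl,
    show ('6':Char).val.toNat = 54 from rfl, show ('7':Char).val.toNat = 55 from rfl,
    show ('8':Char).val.toNat = 56 from rfl, show ('9':Char).val.toNat = 57 from rfl]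
  omega

theorem isallLoop_eq_all (l : List Char) :
    isallLoop l = l.all (fun c => '0' ≤ c && c ≤ '9') := by
  induction l with
  | nil => rfl
  | cons c rest ih =>
    simp only [isallLoop, digit_contains_iff, List.all_cons, ih]
    cases (decide ('0' ≤ c) && decide (c ≤ '9')) <;> simp

-- ===== VERDICT (by name: the statement is the Claim_ definition above) =====
theorem isall_spec : Claim_equal_isall := by
  intro name _
  unfold Spec_isall isall isall_alt
  by_cases h0 : name = "all0"
  · subst h0; decide
  have hne : name.toList ≠ "all0".toList := fun h => h0 (String.toList_injective h)
  have hbe : (name == "all0") = false := by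
    simp [String.ext_iff] at *
    intro h; exact h0 h
  rw [hbe]
  simp only [if_neg hne, Bool.false_or]
  match hs : name.toList with
  | [] => decide
  | [a] => simp
  | [a, b] => simp
  | [a, b, c] => simp
  | a :: b :: c :: d :: rest =>
    rw [show PySem.List.slice (a :: b :: c :: d :: rest) none (some 3) =
          (a :: b :: c :: d :: rest).take 3 from PySem.List.slice_to_natCast _ 3,
        show PySem.List.slice (a :: b :: c :: d :: rest) (some 3) none =
          (a :: b :: c :: d :: rest).drop 3 from PySem.List.slice_from_natCast _ 3]
    simp only [List.take, List.drop, List.length_cons]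
    by_cases hal : a = 'a' ∧ b = 'l' ∧ c = 'l'
    · obtain ⟨rfl, rfl, rfl⟩ := hal
      simp only [show (['a','l','l'] ≠ "all".toList) = False by simp, if_false]
      have hlen : ¬ (rest.length + 1 + 1 + 1 + 1 ≤ 3) := by omega
      rw [if_neg hlen]
      have hget : PySem.List.pyGet? ('a' :: 'l' :: 'l' :: d :: rest) 3 = some d := by
        have h3 : ((3:Int) ≤ (rest.length:Int) + 1 + 1 + 1) := by omega
        simp [PySem.List.pyGet?, PySem.List.pyIdx?, h3]
      rw [hget]
      by_cases hd0 : d = '0'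
      · subst hd0; simp
      · rw [if_neg (by simpa using hd0)]
        rw [isallLoop_eq_all]
        simp only [List.all_cons]
        have : ('1' ≤ d && d ≤ '9') = (('0' ≤ d && d ≤ '9')) := by
          have hvne : d.val.toNat ≠ 48 := fun h => hd0 ((char_eq_iff d '0').mpr h)
          rw [Bool.eq_iff_iff]
          simp only [Bool.and_eq_true, decide_eq_true_eq, Char.le_def, UInt32.le_iff_toNat_le]
          simp only [show ('0':Char).val.toNat = 48 from rfl,
            show ('1':Char).val.toNat = 49 from rfl, show ('9':Char).val.toNat = 57 from rfl]
          omega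
        rw [this]
    · have : (['a','l','l'] : List Char) ≠ [a, b, c] := by
        intro h; apply hal; injection h with h1 h; injection h with h2 h3
        exact ⟨h1.symm, h2.symm, (by injection h3 with h4 _; exact h4.symm)⟩
      rw [if_pos (by simpa [eq_comm] using this)]
      have : (a :: b :: c :: d :: rest ≠ 'a' :: 'l' :: 'l' :: d :: rest) ∨ True := Or.inr trivial
      rcases Decidable.em (a = 'a') with rfl | ha
      · rcases Decidable.em (b = 'l') with rfl | hb
        · rcases Decidable.em (c = 'l') with rfl | hc
          · exact absurd ⟨rfl, rfl, rfl⟩ hal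
          · simp_all
        · simp_all
      · simp_all
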